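-- pv_equiv track=rewrite | github.com/pypi-data/pypi-mirror-383 | packages/AIUnitTest/aiunittest-0.0.7.tar.gz/aiunittest-0.0.7/src/ai_unit_test/services/processing_service.py | _group_consecutive_lines
-- ===== SOURCE A (Python) =====
-- def _group_consecutive_lines(lines: list[int]) -> list[list[int]]:
--     """Group consecutive line numbers into chunks."""
--     if not lines:
--         return []
--
--     sorted_lines = sorted(lines)
--     chunks = []
--     current_chunk = [sorted_lines[0]]
--
--     for line in sorted_lines[1:]:
--         if line == current_chunk[-1] + 1:
--             current_chunk.append(line)
--         else:
--             chunks.append(current_chunk)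
--             current_chunk = [line]
--
--     chunks.append(current_chunk)
--     return chunks
-- ===== SOURCE B (Python) =====
-- def _group_consecutive_lines(lines: list[int]) -> list[list[int]]:
--     """Group consecutive line numbers into chunks.
--
--     Staged decomposition with no chunk accumulator: first compute the cut
--     positions (every index whose value does not continue the previous value
--     by +1, so duplicates and gaps both cut), then slice the sorted list at
--     consecutive pairs of boundaries.
--     """
--     s = sorted(lines)
--     if not s:
--         return []
--     bounds = [0] + [i for i in range(1, len(s)) if s[i] != s[i - 1] + 1] + [len(s)]
--     return [s[a:b] for a, b in zip(bounds, bounds[1:])]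
-- ===== Notes on version B (the rewrite author's own statement) =====
-- stated objective: alternative
-- what changed: B drops A's chunks/current-chunk accumulator loop entirely: it first computes the list of cut indices (positions not continuing the previous value by +1) in one comprehension, then produces the chunks by slicing the sorted list between consecutive boundaries.
import Mathlib
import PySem

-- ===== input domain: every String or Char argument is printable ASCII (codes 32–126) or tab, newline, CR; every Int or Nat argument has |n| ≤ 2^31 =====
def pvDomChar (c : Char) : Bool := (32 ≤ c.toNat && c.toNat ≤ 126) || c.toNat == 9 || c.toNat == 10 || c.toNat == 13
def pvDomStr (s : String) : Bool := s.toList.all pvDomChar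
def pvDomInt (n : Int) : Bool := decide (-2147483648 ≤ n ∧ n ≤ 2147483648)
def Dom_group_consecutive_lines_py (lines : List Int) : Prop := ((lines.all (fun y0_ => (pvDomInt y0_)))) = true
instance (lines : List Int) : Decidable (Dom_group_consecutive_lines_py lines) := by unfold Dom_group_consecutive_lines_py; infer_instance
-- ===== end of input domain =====

-- B drops A's chunks/current-chunk accumulator: it computes the cut indices first,
-- then slices the sorted list between consecutive boundaries; same O(n log n) cost.

-- ===== PORT A =====
-- one loop step of A: (chunks so far, current chunk) and the next line
def aStep (st : List (List Int) × List Int) (line : Int) : List (List Int) × List Int :=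
  -- current_chunk[-1]: the chunk is never empty, so the .getD default is never used
  if line = (PySem.List.pyGet? st.2 (-1)).getD 0 + 1 then (st.1, st.2 ++ [line])
  else (st.1 ++ [st.2], [line])

def group_consecutive_lines_py (lines : List Int) : List (List Int) :=
  if lines = [] then []
  else
    match PySem.List.sorted lines (fun x => x) false with
    | [] => []  -- unreachable: sorted of a nonempty list is nonempty
    | x :: rest =>
      let st := rest.foldl aStep ([], [x])
      st.1 ++ [st.2]

-- ===== PORT B =====
-- [i for i in range(1, len(s)) if s[i] != s[i-1] + 1]
-- (each i is in range, so the pyGet? defaults are never used)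
def bCuts (s : List Int) : List Int :=
  (PySem.List.pyRange 1 (s.length : Int) 1).filter
    (fun i => !((PySem.List.pyGet? s i).getD 0 == (PySem.List.pyGet? s (i - 1)).getD 0 + 1))

def group_consecutive_lines_py_alt (lines : List Int) : List (List Int) :=
  let s := PySem.List.sorted lines (fun x => x) false
  if s = [] then []
  else
    let bounds : List Int := [0] ++ bCuts s ++ [(s.length : Int)]
    -- zip(bounds, bounds[1:]), then s[a:b]
    (bounds.zip ((PySem.List.slice bounds (some 1) none))).map
      (fun ab => PySem.List.slice s (some ab.1) (some ab.2))

-- ===== PRECONDITION & SPEC =====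
def Spec_group_consecutive_lines_py (lines : List Int) (out : List (List Int)) : Prop := out = group_consecutive_lines_py_alt lines
instance (lines : List Int) (out : List (List Int)) : Decidable (Spec_group_consecutive_lines_py lines out) := by unfold Spec_group_consecutive_lines_py; infer_instance

-- ===== CLAIM (what is proved, stated in full; the proofs are below) =====
def Claim_equal_group_consecutive_lines_py : Prop := ∀ (lines : List Int), Dom_group_consecutive_lines_py lines → Spec_group_consecutive_lines_py lines (group_consecutive_lines_py lines)

-- ===== LEMMAS AND PROOFS =====

-- reference recursive grouping: both ports are proved equal to groupRec ∘ sorted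
def splitRun (prev : Int) (xs : List Int) : List Int × List Int :=
  match xs with
  | [] => ([], [])
  | x :: rest =>
    if x = prev + 1 then ((splitRun x rest).1.cons x, (splitRun x rest).2)
    else ([], x :: rest)

lemma splitRun_snd_length (prev : Int) (xs : List Int) :
    (splitRun prev xs).2.length ≤ xs.length := by
  induction xs generalizing prev with
  | nil => simp [splitRun]
  | cons x rest ih =>
    simp only [splitRun]
    split_ifs
    · exact Nat.le_succ_of_le (ih x)
    · simp

lemma splitRun_append (prev : Int) (xs : List Int) :
    (splitRun prev xs).1 ++ (splitRun prev xs).2 = xs := by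
  induction xs generalizing prev with
  | nil => simp [splitRun]
  | cons x rest ih =>
    simp only [splitRun]
    split_ifs
    · simpa using ih x
    · simp

def groupRec : List Int → List (List Int)
  | [] => []
  | x :: rest => (x :: (splitRun x rest).1) :: groupRec (splitRun x rest).2
  termination_by xs => xs.length
  decreasing_by exact Nat.lt_succ_of_le (splitRun_snd_length x rest)

-- ===== A-side: the accumulator fold equals groupRec =====

lemma loop_eq (ys : List Int) : ∀ (chunks : List (List Int)) (cur : List Int) (c : Int),
    (PySem.List.pyGet? cur (-1)).getD 0 = c →
    (ys.foldl aStep (chunks, cur)).1 ++ [(ys.foldl aStep (chunks, cur)).2]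
      = chunks ++ (cur ++ (splitRun c ys).1) :: groupRec (splitRun c ys).2 := by
  induction ys with
  | nil => intro chunks cur c _; simp [splitRun, groupRec]
  | cons y ys ih =>
    intro chunks cur c hlast
    simp only [List.foldl_cons]
    by_cases h : y = c + 1
    · have hA : aStep (chunks, cur) y = (chunks, cur ++ [y]) := by
        simp [aStep, hlast, h]
      rw [hA, ih chunks (cur ++ [y]) y
            (by rw [PySem.List.pyGet?_neg_one_append_singleton]; rfl)]
      simp [splitRun, h]
    · have hA : aStep (chunks, cur) y = (chunks ++ [cur], [y]) := by
        simp [aStep, hlast, h]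
      rw [hA, ih (chunks ++ [cur]) [y] y rfl]
      have : splitRun c (y :: ys) = ([], y :: ys) := by simp [splitRun, h]
      rw [this]
      simp [groupRec]

lemma a_eq_groupRec (s : List Int) :
    (match s with
     | [] => ([] : List (List Int))
     | x :: rest => (rest.foldl aStep ([], [x])).1 ++ [(rest.foldl aStep ([], [x])).2])
      = groupRec s := by
  cases s with
  | nil => simp [groupRec]
  | cons x rest =>
    show (rest.foldl aStep ([], [x])).1 ++ [(rest.foldl aStep ([], [x])).2] = groupRec (x :: rest)
    rw [loop_eq rest [] [x] x rfl]
    simp [groupRec]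

-- ===== B-side: cut positions, in Nat world =====

-- 0-based gap positions: qN s = [k ∈ range (len-1) | s[k+1] ≠ s[k]+1]; the cut index is k+1
def qN (s : List Int) : List Nat :=
  (List.range (s.length - 1)).filter (fun k => !(s[k+1]?.getD 0 == s[k]?.getD 0 + 1))

lemma qN_single (x : Int) : qN [x] = [] := by simp [qN]

lemma qN_cons (x : Int) (xs : List Int) (hne : xs ≠ []) :
    qN (x :: xs) = (if xs[0]?.getD 0 = x + 1 then [] else [0]) ++ (qN xs).map (· + 1) := by
  have hm : xs.length - 1 + 1 = xs.length := Nat.succ_pred_eq_of_pos (List.length_pos_iff.mpr hne)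
  unfold qN
  have h1 : (x :: xs).length - 1 = xs.length := by simp
  rw [h1, ← hm, List.range_succ_eq_map]
  rw [List.filter_cons, List.filter_map]
  have h2 : ∀ k : Nat,
      ((fun k => !((x :: xs)[k+1]?.getD 0 == (x :: xs)[k]?.getD 0 + 1)) ∘ (· + 1)) k
        = (fun k => !(xs[k+1]?.getD 0 == xs[k]?.getD 0 + 1)) k := by
    intro k; simp
  rw [List.filter_congr (fun k _ => h2 k)]
  by_cases h : xs[0]?.getD 0 = x + 1 <;> simp [h]

-- actual cut indices (1-based) follow splitRun
lemma cuts_splitRun (xs : List Int) : ∀ (x : Int),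
    (qN (x :: xs)).map (· + 1)
      = if (splitRun x xs).2 = [] then []
        else ((splitRun x xs).1.length + 1) ::
          ((qN (splitRun x xs).2).map (· + 1)).map (· + ((splitRun x xs).1.length + 1)) := by
  induction xs with
  | nil => intro x; simp [qN_single, splitRun]
  | cons y t ih =>
    intro x
    rw [qN_cons x (y :: t) (by simp)]
    by_cases h : y = x + 1
    · have hcond : (y :: t)[0]?.getD 0 = x + 1 := by simpa using h
      rw [if_pos hcond]
      simp only [splitRun, if_pos h]
      rw [List.nil_append, ih y]
      by_cases hr : (splitRun y t).2 = []
      · simp [hr]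
      · rw [if_neg hr, if_neg hr]
        simp only [List.map_cons, List.map_map, List.length_cons]
        refine congrArg₂ List.cons rfl ?_
        apply List.map_congr_left
        intro a _
        simp [Function.comp]
        omega
    · have hcond : ¬ ((y :: t)[0]?.getD 0 = x + 1) := by simpa using h
      rw [if_neg hcond]
      simp only [splitRun, if_neg h]
      simp only [List.length_nil, if_neg (List.cons_ne_nil y t)]
      simp

-- pairs of consecutive elements
def pairsOf (l : List Nat) : List (Nat × Nat) := l.zip l.tail

lemma pairsOf_map (f : Nat → Nat) (l : List Nat) :
    pairsOf (l.map f) = (pairsOf l).map (Prod.map f f) := by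
  unfold pairsOf
  rw [← List.map_tail, List.zip_map]

-- B's result computed over Nat bounds
def gN (s : List Int) : List (List Int) :=
  (pairsOf (0 :: (qN s).map (· + 1) ++ [s.length])).map
    (fun ab => (s.drop ab.1).take (ab.2 - ab.1))

lemma gN_eq_groupRec (s : List Int) (h : s ≠ []) : gN s = groupRec s := by
  match s with
  | x :: xs =>
    have hsplit := splitRun_append x xs
    have hk : (x :: (splitRun x xs).1).length = (splitRun x xs).1.length + 1 := by simp
    by_cases hr : (splitRun x xs).2 = []
    · -- one single chunk: s = x :: run
      have hxr : (splitRun x xs).1 = xs := by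
        rw [hr] at hsplit; simpa using hsplit
      unfold gN
      rw [cuts_splitRun xs x, if_pos hr]
      show (pairsOf (0 :: [] ++ [(x :: xs).length])).map _ = groupRec (x :: xs)
      rw [show groupRec (x :: xs) = (x :: (splitRun x xs).1) :: groupRec (splitRun x xs).2
            from by rw [groupRec]]
      rw [hr, hxr]
      simp [pairsOf, groupRec]
    · -- chunk of length k, then recurse on r
      set k := (splitRun x xs).1.length + 1 with hkdef
      set r := (splitRun x xs).2 with hrdef
      have hsr : x :: xs = (x :: (splitRun x xs).1) ++ r := by
        rw [List.cons_append, hsplit]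
      have hlen : (x :: xs).length = k + r.length := by
        have h2 := congrArg List.length hsr
        simp only [List.length_cons, List.length_append] at h2 ⊢
        omega
      unfold gN
      rw [cuts_splitRun xs x, if_neg hr, hlen]
      rw [show (0 : Nat) :: (k :: ((qN r).map (· + 1)).map (· + k)) ++ [k + r.length]
            = 0 :: ((0 :: (qN r).map (· + 1) ++ [r.length]).map (· + k)) from by
        simp [Nat.add_comm]]
      have hpairs : pairsOf (0 :: ((0 :: (qN r).map (· + 1) ++ [r.length]).map (· + k)))
          = (0, k) :: (pairsOf (0 :: (qN r).map (· + 1) ++ [r.length])).map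
              (Prod.map (· + k) (· + k)) := by
        rw [← pairsOf_map]
        unfold pairsOf
        cases hc : (0 :: (qN r).map (· + 1) ++ [r.length]).map (· + k) with
        | nil => simp at hc
        | cons b bs =>
          have hb0 : b = k := by
            have := congrArg (fun l => l[0]?) hc
            simpa using this.symm
          simp [hb0]
      rw [hpairs]
      simp only [List.map_cons]
      have hslice1 : ((x :: xs).drop 0).take (k - 0) = x :: (splitRun x xs).1 := by
        rw [List.drop_zero, Nat.sub_zero, hsr]
        exact List.take_left' (by simp [hkdef])
      have hslice2 : ∀ ab : Nat × Nat,
          (((x :: xs).drop (Prod.map (· + k) (· + k) ab).1).take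
              ((Prod.map (· + k) (· + k) ab).2 - (Prod.map (· + k) (· + k) ab).1))
            = (r.drop ab.1).take (ab.2 - ab.1) := by
        intro ⟨a, b⟩
        simp only [Prod.map]
        have h1 : ((x :: xs).drop k).drop a = (x :: xs).drop (a + k) := by
          rw [List.drop_drop]
          congr 1
          omega
        have h2 : (x :: xs).drop k = r := by
          rw [hsr]; exact List.drop_left' (by simp [hkdef])
        rw [← h1, h2]
        congr 1
        omega
      rw [hslice1, List.map_map]
      rw [show ((pairsOf (0 :: (qN r).map (· + 1) ++ [r.length])).map
            ((fun ab => ((x :: xs).drop ab.1).take (ab.2 - ab.1)) ∘ Prod.map (· + k) (· + k)))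
          = (pairsOf (0 :: (qN r).map (· + 1) ++ [r.length])).map
            (fun ab => (r.drop ab.1).take (ab.2 - ab.1)) from
        List.map_congr_left (fun ab _ => hslice2 ab)]
      rw [show (pairsOf (0 :: (qN r).map (· + 1) ++ [r.length])).map
            (fun ab => (r.drop ab.1).take (ab.2 - ab.1)) = gN r from rfl,
          gN_eq_groupRec r hr]
      rw [show groupRec (x :: xs) = (x :: (splitRun x xs).1) :: groupRec (splitRun x xs).2
            from by rw [groupRec]]
  termination_by s.length
  decreasing_by
    simp only [List.length_cons]
    exact Nat.lt_succ_of_le (splitRun_snd_length x xs)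

-- bridge: the port's Int-typed cuts are the Nat cuts, cast
lemma bCuts_eq (s : List Int) :
    bCuts s = ((qN s).map (· + 1)).map (fun k : Nat => (k : Int)) := by
  unfold bCuts qN
  rw [PySem.List.pyRange_one]
  have hn : ((s.length : Int) - 1).toNat = s.length - 1 := by omega
  rw [hn, List.filter_map]
  have hpred : ∀ k ∈ List.range (s.length - 1),
      ((fun i => !((PySem.List.pyGet? s i).getD 0 == (PySem.List.pyGet? s (i - 1)).getD 0 + 1))
          ∘ (fun k : Nat => (1 : Int) + (k : Int))) k
        = (fun k : Nat => !(s[k+1]?.getD 0 == s[k]?.getD 0 + 1)) k := by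
    intro k _
    have h1 : (1 : Int) + (k : Int) = ((k + 1 : Nat) : Int) := by push_cast; ring
    have h2 : ((k + 1 : Nat) : Int) - 1 = ((k : Nat) : Int) := by push_cast; ring
    simp only [Function.comp, h1, h2, PySem.List.pyGet?_natCast]
  rw [List.filter_congr hpred, List.map_map]
  apply List.map_congr_left
  intro k _
  simp [Function.comp]
  omega

-- bridge: the port's Int-typed slicing pipeline is gN
lemma b_eq_gN (s : List Int) :
    (([0] ++ bCuts s ++ [(s.length : Int)]).zip
        (PySem.List.slice ([0] ++ bCuts s ++ [(s.length : Int)]) (some 1) none)).map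
      (fun ab : Int × Int => PySem.List.slice s (some ab.1) (some ab.2)) = gN s := by
  rw [PySem.List.slice_from_one, bCuts_eq]
  rw [show [(0 : Int)] ++ ((qN s).map (· + 1)).map (fun k : Nat => (k : Int)) ++ [(s.length : Int)]
        = ((0 :: (qN s).map (· + 1) ++ [s.length] : List Nat).map (fun k : Nat => (k : Int))) from by
    simp]
  rw [← List.map_tail, List.zip_map, List.map_map]
  unfold gN pairsOf
  apply List.map_congr_left
  intro ab _
  simp only [Function.comp, Prod.map]
  exact PySem.List.slice_natCast ..

-- ===== VERDICT (by name: the statement is the Claim_ definition above) =====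
theorem group_consecutive_lines_py_spec : Claim_equal_group_consecutive_lines_py := by
  intro lines _
  unfold Spec_group_consecutive_lines_py group_consecutive_lines_py group_consecutive_lines_py_alt
  by_cases hnil : lines = []
  · subst hnil
    simp [PySem.List.sorted]
  · simp only [hnil, if_false]
    have hs : PySem.List.sorted lines (fun x => x) false ≠ [] := by
      intro h
      exact hnil ((PySem.List.sorted_eq_nil_iff _ _ _).mp h)
    rw [if_neg hs]
    cases hse : PySem.List.sorted lines (fun x => x) false with
    | nil => exact absurd hse hs
    | cons x rest =>
      rw [a_eq_groupRec (x :: rest), b_eq_gN (x :: rest),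
          gN_eq_groupRec (x :: rest) (by simp)]
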